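-- pv_equiv track=rewrite | github.com/QuadDarv1ne/maestro7it_education | codeforces/Codeforces Round 1054 (Div. 3)/python/E.py | count_at_most_k_len_le
-- ===== SOURCE A (Python) =====
-- from collections import defaultdict
--
-- def count_at_most_k_len_le(arr, k, R):
--     """
--     Возвращает количество подмассивов с <= k различных чисел и длиной <= R.
--     Для каждого правого конца r поддерживаем левый указатель L_k такой, что
--     [L_k, r] имеет <= k различных, тогда число левых позиций, удовлетворяющих
--     длине <= R равно max(0, r - max(L_k, r-R+1) + 1).
--     Сложность O(n).
--     """
--     if R <= 0:
--         return 0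
--     n = len(arr)
--     cnt = defaultdict(int)
--     distinct = 0
--     L = 0
--     total = 0
--     for r in range(n):
--         x = arr[r]
--         if cnt[x] == 0:
--             distinct += 1
--         cnt[x] += 1
--         while distinct > k:
--             y = arr[L]
--             cnt[y] -= 1
--             if cnt[y] == 0:
--                 distinct -= 1
--             L += 1
--         left_bound = max(L, r - R + 1)
--         if left_bound <= r:
--             total += (r - left_bound + 1)
--     return total
-- ===== SOURCE B (Python) =====
-- def count_at_most_k_len_le(arr, k, R):
--     total = 0
--     for i in range(len(arr)):
--         seen = set()
--         for x in arr[i : i + max(R, 0)]: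
--             seen.add(x)
--             if len(seen) > k:
--                 break
--             total += 1
--     return total
-- ===== Notes on version B (the rewrite author's own statement) =====
-- stated objective: simpler
-- what changed: Replaces the single-pass sliding window (rolling count dict, left pointer, closed-form per-right-end count) by a direct brute-force enumeration: for each left endpoint extend rightward with a set until distinct exceeds k or length reaches R, counting each valid subarray one by one.
import Mathlib
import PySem

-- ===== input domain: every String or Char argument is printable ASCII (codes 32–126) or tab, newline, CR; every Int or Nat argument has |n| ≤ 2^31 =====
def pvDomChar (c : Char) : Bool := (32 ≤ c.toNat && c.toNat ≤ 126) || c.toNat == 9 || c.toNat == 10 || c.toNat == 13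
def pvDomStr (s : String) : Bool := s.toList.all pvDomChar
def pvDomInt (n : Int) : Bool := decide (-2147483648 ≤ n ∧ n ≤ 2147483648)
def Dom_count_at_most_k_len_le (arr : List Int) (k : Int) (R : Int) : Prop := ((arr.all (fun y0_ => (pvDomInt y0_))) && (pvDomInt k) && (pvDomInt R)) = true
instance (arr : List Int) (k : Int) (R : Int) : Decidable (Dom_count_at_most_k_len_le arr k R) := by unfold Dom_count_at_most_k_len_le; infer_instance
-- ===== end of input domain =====

-- B replaces A's rolling sliding window by a direct per-left-endpoint scan with a set; objective: simpler.

-- ===== PORT A =====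
-- A's 'while distinct > k' loop; the fuel argument only makes the recursion total
-- (inside Pre_ the loop terminates within arr.length steps, so the fuel never runs out)
def pvShrink (arr : List Int) (k : Int) :
    Nat → PySem.Dict Int Int × Int × Int → PySem.Dict Int Int × Int × Int
  | 0, st => st
  | fuel+1, (cnt, distinct, L) =>
    if k < distinct then
      let y := PySem.List.pyGetD arr L 0
      let cnt' := cnt.insert y (cnt.getD y 0 - 1)
      let distinct' := if cnt'.getD y 0 == 0 then distinct - 1 else distinct
      pvShrink arr k fuel (cnt', distinct', L + 1)
    else (cnt, distinct, L)

-- one iteration of A's 'for r in range(n)' body; state = (cnt, distinct, L, total)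
def pvStepA (arr : List Int) (k R : Int) (st : PySem.Dict Int Int × Int × Int × Int) (r : Int) :
    PySem.Dict Int Int × Int × Int × Int :=
  let x := PySem.List.pyGetD arr r 0
  let distinct1 := if st.1.getD x 0 == 0 then st.2.1 + 1 else st.2.1
  let cnt1 := st.1.insert x (st.1.getD x 0 + 1)
  let s2 := pvShrink arr k arr.length (cnt1, distinct1, st.2.2.1)
  let leftBound := max s2.2.2 (r - R + 1)
  let total1 := if leftBound ≤ r then st.2.2.2 + (r - leftBound + 1) else st.2.2.2
  (s2.1, s2.2.1, s2.2.2, total1)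

def count_at_most_k_len_le (arr : List Int) (k : Int) (R : Int) : Int :=
  if R ≤ 0 then 0
  else ((PySem.List.pyRange 0 arr.length 1).foldl (pvStepA arr k R)
    (PySem.Dict.empty, 0, 0, 0)).2.2.2

-- ===== PORT B =====
-- inner loop of B over the slice arr[i : i + max(R, 0)], with its break
def pvBInner : List Int → Int → PySem.Set Int → Int → Int
  | [], _, _, total => total
  | x :: xs, k, seen, total =>
    let seen' := PySem.Set.add seen x
    if k < PySem.Set.len seen' then total
    else pvBInner xs k seen' (total + 1)

def count_at_most_k_len_le_alt (arr : List Int) (k : Int) (R : Int) : Int :=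
  (PySem.List.pyRange 0 arr.length 1).foldl
    (fun total i =>
      pvBInner (PySem.List.slice arr (some i) (some (i + max R 0))) k PySem.Set.empty total) 0

-- ===== PRECONDITION & SPEC =====
-- Pre_ excludes exactly the inputs on which the Python A raises: for R > 0, nonempty arr and
-- k < 0, A's shrink loop walks its left pointer past the end of the array (IndexError).
def Pre_count_at_most_k_len_le (arr : List Int) (k : Int) (R : Int) : Prop :=
  R ≤ 0 ∨ arr = [] ∨ 0 ≤ k
instance (arr : List Int) (k : Int) (R : Int) : Decidable (Pre_count_at_most_k_len_le arr k R) := by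
  unfold Pre_count_at_most_k_len_le; infer_instance
def pvWitness_count_at_most_k_len_le : List Int × Int × Int := ([1, 2, 1, 3], 2, 3)

def Spec_count_at_most_k_len_le (arr : List Int) (k : Int) (R : Int) (out : Int) : Prop :=
  out = count_at_most_k_len_le_alt arr k R
instance (arr : List Int) (k : Int) (R : Int) (out : Int) : Decidable (Spec_count_at_most_k_len_le arr k R out) := by
  unfold Spec_count_at_most_k_len_le; infer_instance

-- ===== CLAIM (what is proved, stated in full; the proofs are below) =====
def Claim_equal_count_at_most_k_len_le : Prop := ∀ (arr : List Int) (k : Int) (R : Int), Dom_count_at_most_k_len_le arr k R → Pre_count_at_most_k_len_le arr k R → Spec_count_at_most_k_len_le arr k R (count_at_most_k_len_le arr k R)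

-- ===== LEMMAS AND PROOFS =====

def pvWin (arr : List Int) (i j : Nat) : List Int := (arr.drop i).take (j - i)

lemma pvWin_self (arr : List Int) (i : Nat) : pvWin arr i i = [] := by simp [pvWin]

def pvD (arr : List Int) (i j : Nat) : Int := ((pvWin arr i j).toFinset.card : Int)

lemma pvWin_cons (arr : List Int) (i j : Nat) (hij : i < j) (hi : i < arr.length) :
    pvWin arr i j = arr[i] :: pvWin arr (i+1) j := by
  unfold pvWin
  rw [List.drop_eq_getElem_cons hi]
  have : j - i = (j - (i+1)) + 1 := by omega
  rw [this, List.take_succ_cons]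

lemma pvWin_snoc (arr : List Int) (i j : Nat) (hij : i ≤ j) (hj : j < arr.length) :
    pvWin arr i (j+1) = pvWin arr i j ++ [arr[j]] := by
  unfold pvWin
  have h1 : j + 1 - i = (j - i) + 1 := by omega
  rw [h1, List.take_add_one]
  congr 1
  have hidx : i + (j - i) = j := by omega
  have : (arr.drop i)[j - i]? = some arr[j] := by
    rw [List.getElem?_drop, hidx, List.getElem?_eq_getElem hj]
  simp [this]

lemma pvD_cons (arr : List Int) (i j : Nat) (hij : i < j) (hi : i < arr.length) :
    pvD arr i j = pvD arr (i+1) j +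
      (if (pvWin arr (i+1) j).count arr[i] = 0 then 1 else 0) := by
  unfold pvD
  rw [pvWin_cons arr i j hij hi]
  rw [List.toFinset_cons]
  by_cases hm : arr[i] ∈ pvWin arr (i+1) j
  · rw [Finset.insert_eq_self.mpr (by simpa using hm)]
    rw [if_neg (by simpa [List.count_eq_zero] using hm)]
    simp
  · rw [Finset.card_insert_of_notMem (by simpa using hm)]
    rw [if_pos (by simpa [List.count_eq_zero] using hm)]
    push_cast; ring

lemma pvD_snoc (arr : List Int) (i j : Nat) (hij : i ≤ j) (hj : j < arr.length) :
    pvD arr i (j+1) = pvD arr i j +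
      (if (pvWin arr i j).count arr[j] = 0 then 1 else 0) := by
  unfold pvD
  rw [pvWin_snoc arr i j hij hj]
  rw [List.toFinset_append]
  by_cases hm : arr[j] ∈ pvWin arr i j
  · have : ((pvWin arr i j).toFinset ∪ [arr[j]].toFinset) = (pvWin arr i j).toFinset := by
      rw [Finset.union_eq_left]
      simpa using hm
    rw [this, if_neg (by simpa [List.count_eq_zero] using hm)]
    simp
  · have : (pvWin arr i j).toFinset ∪ [arr[j]].toFinset = insert arr[j] (pvWin arr i j).toFinset := by
      simp [Finset.union_comm]
    rw [this, Finset.card_insert_of_notMem (by simpa using hm)]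
    rw [if_pos (by simpa [List.count_eq_zero] using hm)]
    push_cast; ring

lemma pvD_anti (arr : List Int) (j : Nat) {i i' : Nat} (h : i ≤ i') :
    pvD arr i' j ≤ pvD arr i j := by
  induction i', h using Nat.le_induction with
  | base => exact le_refl _
  | succ m hm ih =>
    refine le_trans ?_ ih
    by_cases hmj : m < j ∧ m < arr.length
    · rw [pvD_cons arr m j hmj.1 hmj.2]
      split <;> simp [pvD]
    · have hnil : pvWin arr (m+1) j = [] := by
        unfold pvWin
        rcases (by omega : j ≤ m ∨ arr.length ≤ m) with h' | h'
        · rw [show j - (m+1) = 0 by omega]; rfl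
        · rw [List.drop_eq_nil_of_le (by simpa using Nat.le_succ_of_le h')]; simp
      have : pvD arr (m+1) j = 0 := by simp [pvD, hnil]
      rw [this]
      simp [pvD]

lemma pvD_mono_right (arr : List Int) (i : Nat) {j j' : Nat} (h : j ≤ j') :
    pvD arr i j ≤ pvD arr i j' := by
  unfold pvD
  have hsub : pvWin arr i j ⊆ pvWin arr i j' := by
    unfold pvWin
    intro x hx
    rw [← Nat.min_eq_left (show j - i ≤ j' - i by omega), ← List.take_take] at hx
    exact List.take_subset _ _ hx
  exact_mod_cast Finset.card_le_card (by intro x hx; simp at hx ⊢; exact hsub hx)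

def pvTrack (arr : List Int) (l j : Nat) (cnt : PySem.Dict Int Int) (distinct : Int) : Prop :=
  (∀ y, cnt.getD y 0 = ((pvWin arr l j).count y : Int)) ∧ distinct = pvD arr l j

lemma pvShrink_spec (arr : List Int) (k : Int) (hk : 0 ≤ k) (j : Nat) (hj : j ≤ arr.length) :
    ∀ (fuel l : Nat) (cnt : PySem.Dict Int Int) (distinct : Int),
      l ≤ j → j - l ≤ fuel →
      pvTrack arr l j cnt distinct →
      (∀ i : Nat, i < l → k < pvD arr i j) →
      ∃ (l' : Nat) (cnt' : PySem.Dict Int Int),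
        pvShrink arr k fuel (cnt, distinct, (l : Int)) = (cnt', pvD arr l' j, (l' : Int)) ∧
        l ≤ l' ∧ l' ≤ j ∧
        pvTrack arr l' j cnt' (pvD arr l' j) ∧
        pvD arr l' j ≤ k ∧
        (∀ i : Nat, i < l' → k < pvD arr i j) := by
  intro fuel
  induction fuel with
  | zero =>
    intro l cnt distinct hlj hfuel htr hmin
    have hlj' : l = j := by omega
    subst hlj'
    have hD0 : pvD arr l l = 0 := by simp [pvD, pvWin_self]
    refine ⟨l, cnt, ?_, le_refl _, le_refl _, ?_, by omega, hmin⟩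
    · simp [pvShrink, htr.2, hD0]
    · exact ⟨htr.1, rfl⟩
  | succ fuel ih =>
    intro l cnt distinct hlj hfuel htr hmin
    by_cases hcond : k < distinct
    · -- loop body runs
      have hDgt : k < pvD arr l j := htr.2 ▸ hcond
      have hlj2 : l < j := by
        by_contra hno
        have : l = j := by omega
        subst this
        simp [pvD, pvWin_self] at hDgt
        omega
      have hlen : l < arr.length := by omega
      have hy : PySem.List.pyGetD arr (l : Int) 0 = arr[l] := by
        simp [pysem, hlen]
      have hwin : pvWin arr l j = arr[l] :: pvWin arr (l+1) j := pvWin_cons arr l j hlj2 hlen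
      set y := arr[l] with hy'
      set w' := pvWin arr (l+1) j with hw'
      have hcnt' : ∀ z, (cnt.insert y (cnt.getD y 0 - 1)).getD z 0 = ((w'.count z : Nat) : Int) := by
        intro z
        by_cases hz : z = y
        · rw [hz, PySem.Dict.getD_insert_self, htr.1 y, hwin]
          simp only [List.count_cons]
          push_cast
          simp
        · have := htr.1 z
          rw [hwin] at this
          simp [pysem, hz, this, List.count_cons]
          exact fun h => hz h.symm
      have hDcons := pvD_cons arr l j hlj2 hlen
      have hdistinct' :
          (if (cnt.insert y (cnt.getD y 0 - 1)).getD y 0 == 0 then distinct - 1 else distinct) =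
            pvD arr (l+1) j := by
        rw [hcnt' y, htr.2, hDcons]
        by_cases h0 : w'.count y = 0
        · simp only [h0]
          rw [if_pos (show List.count arr[l] (pvWin arr (l+1) j) = 0 from h0)]
          simp
        · have hne : ((List.count y w' : Int) == 0) = false := by
            simp
            exact_mod_cast h0
          rw [hne, if_neg (show ¬ (List.count arr[l] (pvWin arr (l+1) j) = 0) from h0)]
          simp
      have hstep : pvShrink arr k (fuel+1) (cnt, distinct, (l : Int)) =
          pvShrink arr k fuel
            (cnt.insert y (cnt.getD y 0 - 1),
             (if (cnt.insert y (cnt.getD y 0 - 1)).getD y 0 == 0 then distinct - 1 else distinct),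
             ((l+1 : Nat) : Int)) := by
        show (if k < distinct then _ else _) = _
        rw [if_pos hcond]
        rw [hy]
        push_cast
        rfl
      have hmin' : ∀ i : Nat, i < l + 1 → k < pvD arr i j := by
        intro i hi
        rcases Nat.lt_succ_iff_lt_or_eq.mp hi with h | h
        · exact hmin i h
        · subst h; exact hDgt
      have hle1 : l + 1 ≤ j := hlj2
      have hle2 : j - (l+1) ≤ fuel := by omega
      obtain ⟨l', cnt', heq, h1, h2, h3, h4, h5⟩ :=
        ih (l+1) (cnt.insert y (cnt.getD y 0 - 1))
          (if (cnt.insert y (cnt.getD y 0 - 1)).getD y 0 == 0 then distinct - 1 else distinct)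
          hle1 hle2 ⟨hcnt', hdistinct'⟩ hmin'
      exact ⟨l', cnt', by rw [hstep, heq], by omega, h2, h3, h4, h5⟩
    · refine ⟨l, cnt, ?_, le_refl _, hlj, ⟨htr.1, rfl⟩, htr.2 ▸ (not_lt.mp hcond), hmin⟩
      show (if k < distinct then _ else _) = _
      rw [if_neg hcond, htr.2]

def pvW (arr : List Int) (k R : Int) (i r : Nat) : Int :=
  if i ≤ r ∧ (r : Int) < (i : Int) + R ∧ pvD arr i (r+1) ≤ k then 1 else 0

lemma pvRow (arr : List Int) (k R : Int) (hR : 0 < R) (r l' : Nat) (hr : r < arr.length)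
    (hl : l' ≤ r + 1) (hle : pvD arr l' (r+1) ≤ k)
    (hmin : ∀ i : Nat, i < l' → k < pvD arr i (r+1)) :
    (if max (l' : Int) ((r : Int) - R + 1) ≤ (r : Int)
      then ((r : Int) - max (l' : Int) ((r : Int) - R + 1) + 1) else 0) =
    ∑ i ∈ Finset.range arr.length, pvW arr k R i r := by
  have hRt : ((R.toNat : Int)) = R := Int.toNat_of_nonneg hR.le
  have hcond : ∀ i : Nat, (i ≤ r ∧ (r : Int) < (i : Int) + R ∧ pvD arr i (r+1) ≤ k) ↔
      (max l' (r + 1 - R.toNat) ≤ i ∧ i ≤ r) := by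
    intro i
    constructor
    · rintro ⟨h1, h2, h3⟩
      have : l' ≤ i := by
        by_contra hno
        exact absurd h3 (not_le.mpr (hmin i (by omega)))
      omega
    · rintro ⟨h1, h2⟩
      refine ⟨h2, by omega, ?_⟩
      exact le_trans (pvD_anti arr (r+1) (by omega : l' ≤ i)) hle
  have hsum : ∑ i ∈ Finset.range arr.length, pvW arr k R i r =
      ∑ i ∈ Finset.range arr.length,
        (if max l' (r + 1 - R.toNat) ≤ i ∧ i ≤ r then (1:Int) else 0) := by
    refine Finset.sum_congr rfl fun i _ => ?_
    unfold pvW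
    rw [if_congr (hcond i) rfl rfl]
  rw [hsum, Finset.sum_boole]
  have hfil : (Finset.range arr.length).filter (fun i => max l' (r + 1 - R.toNat) ≤ i ∧ i ≤ r) =
      Finset.Icc (max l' (r + 1 - R.toNat)) r := by
    ext i
    simp [Finset.mem_Icc]
    omega
  rw [hfil, Nat.card_Icc]
  omega

def pvInv (arr : List Int) (k R : Int) (r' : Nat)
    (st : PySem.Dict Int Int × Int × Int × Int) : Prop :=
  ∃ l : Nat, st.2.2.1 = (l : Int) ∧ l ≤ r' ∧
    pvTrack arr l r' st.1 st.2.1 ∧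
    pvD arr l r' ≤ k ∧
    (∀ i : Nat, i < l → k < pvD arr i r') ∧
    st.2.2.2 = ∑ r ∈ Finset.range r', ∑ i ∈ Finset.range arr.length, pvW arr k R i r

lemma pvStepA_inv (arr : List Int) (k R : Int) (hk : 0 ≤ k) (hR : 0 < R) (r' : Nat)
    (hr : r' < arr.length) (st : PySem.Dict Int Int × Int × Int × Int)
    (h : pvInv arr k R r' st) :
    pvInv arr k R (r'+1) (pvStepA arr k R st (r' : Int)) := by
  obtain ⟨cnt, distinct, L, total⟩ := st
  obtain ⟨l, hL, hlr, htr, hDle, hmin, htot⟩ := h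
  simp only at hL hlr htr hDle hmin htot
  subst hL
  have hx : PySem.List.pyGetD arr ((r' : Nat) : Int) 0 = arr[r'] := by simp [pysem, hr]
  set x := arr[r'] with hx'
  have hsnoc : pvWin arr l (r'+1) = pvWin arr l r' ++ [x] := pvWin_snoc arr l r' hlr hr
  have hcnt1 : ∀ z, (cnt.insert x (cnt.getD x 0 + 1)).getD z 0 =
      ((pvWin arr l (r'+1)).count z : Int) := by
    intro z
    by_cases hz : z = x
    · rw [hz, PySem.Dict.getD_insert_self, htr.1 x, hsnoc]
      simp [List.count_append]
    · have hts := htr.1 z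
      simp [pysem, hz, hts, hsnoc, List.count_append, List.count_singleton]
      exact fun h => hz h.symm
  have hDsnoc := pvD_snoc arr l r' hlr hr
  have hdist1 : (if cnt.getD x 0 == 0 then distinct + 1 else distinct) = pvD arr l (r'+1) := by
    rw [htr.1 x, htr.2, hDsnoc]
    by_cases h0 : (pvWin arr l r').count x = 0
    · simp only [h0]
      rw [if_pos (show List.count arr[r'] (pvWin arr l r') = 0 from h0)]
      simp
    · have hne : ((List.count x (pvWin arr l r') : Int) == 0) = false := by
        simp
        exact_mod_cast h0
      rw [hne, if_neg (show ¬ (List.count arr[r'] (pvWin arr l r') = 0) from h0)]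
      simp
  have hmin' : ∀ i : Nat, i < l → k < pvD arr i (r'+1) :=
    fun i hi => lt_of_lt_of_le (hmin i hi) (pvD_mono_right arr i (Nat.le_succ _))
  obtain ⟨l', cnt', heq, h1, h2, h3, h4, h5⟩ :=
    pvShrink_spec arr k hk (r'+1) (by omega) arr.length l
      (cnt.insert x (cnt.getD x 0 + 1))
      (if cnt.getD x 0 == 0 then distinct + 1 else distinct)
      (by omega) (by omega) ⟨hcnt1, hdist1⟩ hmin'
  refine ⟨l', ?_, ?_, ?_, ?_, ?_, ?_⟩
  · show (pvShrink arr k arr.length _).2.2 = _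
    rw [hx, heq]
  · exact h2
  · show pvTrack arr l' (r'+1) (pvShrink arr k arr.length _).1 (pvShrink arr k arr.length _).2.1
    rw [hx, heq]
    exact h3
  · exact h4
  · exact h5
  · show (if max (pvShrink arr k arr.length _).2.2 ((r' : Int) - R + 1) ≤ ((r' : Nat) : Int)
        then total + (((r' : Nat) : Int) - max (pvShrink arr k arr.length _).2.2 (((r' : Nat) : Int) - R + 1) + 1)
        else total) = _
    rw [hx, heq]
    simp only
    rw [Finset.sum_range_succ, htot, ← pvRow arr k R hR r' l' hr h2 h4 h5]
    split
    · ring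
    · ring

lemma pvRange_cast (n : Nat) : PySem.List.pyRange 0 n 1 = (List.range n).map (fun (j : Nat) => (j : Int)) := by
  rw [PySem.List.pyRange_one]
  simp only [sub_zero, Int.toNat_natCast, zero_add]

lemma pvA_loop (arr : List Int) (k R : Int) (hk : 0 ≤ k) (hR : 0 < R) :
    ∀ r' : Nat, r' ≤ arr.length →
      pvInv arr k R r' ((List.range r').foldl
        (fun st (j : Nat) => pvStepA arr k R st (j : Int)) (PySem.Dict.empty, 0, 0, 0)) := by
  intro r'
  induction r' with
  | zero =>
    intro _
    refine ⟨0, rfl, le_refl _, ⟨?_, ?_⟩, ?_, by omega, by simp⟩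
    · intro y; simp [pysem, pvWin_self]
    · simp [pvD, pvWin_self]
    · simp [pvD, pvWin_self]; exact hk
  | succ r' ih =>
    intro hle
    rw [List.range_succ, List.foldl_append]
    exact pvStepA_inv arr k R hk hR r' (by omega) _ (ih (by omega))

lemma pvA_eq_sum (arr : List Int) (k R : Int) (hk : 0 ≤ k) (hR : 0 < R) :
    count_at_most_k_len_le arr k R =
      ∑ r ∈ Finset.range arr.length, ∑ i ∈ Finset.range arr.length, pvW arr k R i r := by
  unfold count_at_most_k_len_le
  rw [if_neg (by omega)]
  rw [pvRange_cast, List.foldl_map]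
  obtain ⟨l, hL, hlr, htr, hDle, hmin, htot⟩ := pvA_loop arr k R hk hR arr.length (le_refl _)
  exact htot

def pvCap (k : Int) : Finset Int → List Int → Nat
  | _, [] => 0
  | s, x :: xs => if ((insert x s).card : Int) ≤ k then pvCap k (insert x s) xs + 1 else 0

lemma pvSet_add_toFinset (s : PySem.Set Int) (x : Int) :
    (PySem.Set.add s x).toFinset = insert x s.toFinset := by
  simp only [PySem.Set.add, PySem.Set.contains]
  split <;> simp_all [Finset.insert_eq_self]

lemma pvSet_add_nodup (s : PySem.Set Int) (x : Int) (h : s.Nodup) :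
    (PySem.Set.add s x).Nodup := by
  simp only [PySem.Set.add, PySem.Set.contains]
  split
  · exact h
  · next hc =>
    simp [List.nodup_append, h]
    intro a ha h'
    have hx : x ∉ s := by simpa using hc
    exact hx (h' ▸ ha)

lemma pvSet_len_add (s : PySem.Set Int) (x : Int) (h : s.Nodup) :
    PySem.Set.len (PySem.Set.add s x) = ((insert x s.toFinset).card : Int) := by
  show ((PySem.Set.add s x).length : Int) = _
  rw [← List.toFinset_card_of_nodup (pvSet_add_nodup s x h), pvSet_add_toFinset]

lemma pvBInner_eq (k : Int) :
    ∀ (ys : List Int) (s : PySem.Set Int) (t : Int), s.Nodup →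
      pvBInner ys k s t = t + (pvCap k s.toFinset ys : Int) := by
  intro ys
  induction ys with
  | nil => intro s t _; simp [pvBInner, pvCap]
  | cons x xs ih =>
    intro s t h
    show (if k < PySem.Set.len (PySem.Set.add s x) then t
          else pvBInner xs k (PySem.Set.add s x) (t + 1)) =
         t + ((if ((insert x s.toFinset).card : Int) ≤ k
               then pvCap k (insert x s.toFinset) xs + 1 else 0 : Nat) : Int)
    rw [pvSet_len_add s x h]
    by_cases hc : ((insert x s.toFinset).card : Int) ≤ k
    · rw [if_neg (not_lt.mpr hc), if_pos hc]
      rw [ih (PySem.Set.add s x) (t + 1) (pvSet_add_nodup s x h), pvSet_add_toFinset]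
      push_cast
      ring
    · rw [if_pos (not_le.mp hc), if_neg hc]
      simp

lemma pvCap_sum (k : Int) :
    ∀ (ys : List Int) (s : Finset Int),
      (pvCap k s ys : Int) = ∑ m ∈ Finset.range ys.length,
        (if (((s ∪ (ys.take (m+1)).toFinset).card : Int) ≤ k) then (1:Int) else 0) := by
  intro ys
  induction ys with
  | nil => intro s; simp [pvCap]
  | cons x xs ih =>
    intro s
    rw [show (x :: xs).length = xs.length + 1 from rfl, Finset.sum_range_succ']
    have hf0 : (if (((s ∪ ((x :: xs).take 1).toFinset).card : Int) ≤ k) then (1:Int) else 0) =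
        (if (((insert x s).card : Int) ≤ k) then (1:Int) else 0) := by
      have h01 : s ∪ ((x :: xs).take 1).toFinset = insert x s := by
        rw [show (x :: xs).take 1 = [x] from rfl]
        simp
      rw [h01]
    have hfs : ∀ m : Nat, s ∪ ((x :: xs).take (m+1+1)).toFinset =
        (insert x s) ∪ ((xs.take (m+1)).toFinset) := by
      intro m
      rw [show (x :: xs).take (m+1+1) = x :: xs.take (m+1) from rfl]
      rw [List.toFinset_cons, Finset.union_insert, Finset.insert_union]
    show ((if ((insert x s).card : Int) ≤ k then pvCap k (insert x s) xs + 1 else 0 : Nat) : Int) = _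
    by_cases hc : ((insert x s).card : Int) ≤ k
    · rw [if_pos hc, hf0, if_pos hc]
      push_cast
      rw [ih (insert x s)]
      congr 1
      refine Finset.sum_congr rfl fun m _ => ?_
      rw [hfs m]
    · rw [if_neg hc, hf0, if_neg hc]
      have : ∀ m ∈ Finset.range xs.length,
          (if (((s ∪ ((x :: xs).take (m+1+1)).toFinset).card : Int) ≤ k) then (1:Int) else 0) = 0 := by
        intro m _
        rw [hfs m, if_neg]
        intro hle
        exact hc (le_trans (by exact_mod_cast Finset.card_le_card Finset.subset_union_left) hle)
      rw [Finset.sum_congr rfl this]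
      simp

lemma pvFoldl_add (g : Nat → Int) (f : Int → Nat → Int) :
    ∀ (l : List Nat), (∀ t i, i ∈ l → f t i = t + g i) → ∀ init,
      l.foldl f init = init + (l.map g).sum := by
  intro l
  induction l with
  | nil => intro _ init; simp
  | cons x xs ih =>
    intro hf init
    rw [List.foldl_cons, hf init x (by simp), ih (fun t i hi => hf t i (by simp [hi])) _]
    simp [add_assoc]

lemma pvSliceB (arr : List Int) (R : Int) (i : Nat) :
    PySem.List.slice arr (some (i : Int)) (some ((i : Int) + max R 0)) =
      (arr.drop i).take (max R 0).toNat := by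
  have h : (i : Int) + max R 0 = ((i + (max R 0).toNat : Nat) : Int) := by
    push_cast [Int.toNat_of_nonneg (le_max_right R 0)]
    ring
  rw [h, PySem.List.slice_natCast]
  congr 1
  omega

lemma pvColumn (arr : List Int) (k R : Int) (i : Nat) (hi : i < arr.length) :
    (pvCap k ∅ ((arr.drop i).take (max R 0).toNat) : Int) =
      ∑ r ∈ Finset.range arr.length, pvW arr k R i r := by
  have hRc : (((max R 0).toNat : Int)) = max R 0 := Int.toNat_of_nonneg (le_max_right R 0)
  generalize hg : (max R 0).toNat = R' at hRc ⊢
  have hRle : R ≤ (R' : Int) := by rw [hRc]; exact le_max_left R 0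
  rw [pvCap_sum]
  have hlen : ((arr.drop i).take R').length = min R' (arr.length - i) := by simp
  rw [hlen]
  have hsplit : ∑ r ∈ Finset.range arr.length, pvW arr k R i r
      = ∑ r ∈ Finset.Ico i arr.length, pvW arr k R i r := by
    rw [Finset.range_eq_Ico,
      ← Finset.sum_Ico_consecutive _ (Nat.zero_le i) (le_of_lt hi)]
    have h0 : ∑ r ∈ Finset.Ico 0 i, pvW arr k R i r = 0 := by
      refine Finset.sum_eq_zero fun r hr => ?_
      unfold pvW
      rw [if_neg]
      rintro ⟨h1, -, -⟩
      simp [Finset.mem_Ico] at hr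
      omega
    rw [h0, zero_add]
  rw [hsplit, Finset.sum_Ico_eq_sum_range]
  have hsub : ∑ m ∈ Finset.range (arr.length - i), pvW arr k R i (i + m)
      = ∑ m ∈ Finset.range (min R' (arr.length - i)), pvW arr k R i (i + m) := by
    symm
    refine Finset.sum_subset (fun x hx => Finset.mem_range.mpr
      (lt_of_lt_of_le (Finset.mem_range.mp hx) (Nat.min_le_right _ _))) ?_
    intro m hm hnm
    simp only [Finset.mem_range] at hm hnm
    have hge : R' ≤ m := by
      rcases Nat.le_total R' (arr.length - i) with hmin | hmin
      · rw [Nat.min_eq_left hmin] at hnm; omega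
      · rw [Nat.min_eq_right hmin] at hnm; omega
    unfold pvW
    rw [if_neg]
    rintro ⟨-, h2, -⟩
    have h3 : ((i + m : Nat) : Int) < (i : Int) + R := h2
    push_cast at h3
    have h3' : (m : Int) < R := by omega
    have : (R' : Int) ≤ (m : Int) := by exact_mod_cast hge
    omega
  rw [hsub]
  refine Finset.sum_congr rfl fun m hm => ?_
  simp only [Finset.mem_range] at hm
  have hmR : m < R' := lt_of_lt_of_le hm (Nat.min_le_left _ _)
  have htake : ((arr.drop i).take R').take (m+1) = (arr.drop i).take (m+1) := by
    rw [List.take_take, Nat.min_eq_left (by omega)]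
  rw [htake, Finset.empty_union]
  have hwin : pvWin arr i (i + m + 1) = (arr.drop i).take (m+1) := by
    unfold pvWin
    congr 1
    omega
  unfold pvW pvD
  rw [hwin]
  by_cases hc : (((arr.drop i).take (m+1)).toFinset.card : Int) ≤ k
  · rw [if_pos hc, if_pos ?_]
    refine ⟨by omega, ?_, hc⟩
    have h4 : (m : Int) < (R' : Int) := by exact_mod_cast hmR
    have h5 : (R' : Int) = R := by
      rcases max_choice R 0 with hmx | hmx
      · rw [hRc, hmx]
      · rw [hRc, hmx] at h4 ⊢
        omega
    push_cast
    omega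
  · rw [if_neg hc, if_neg ?_]
    rintro ⟨-, -, h⟩
    exact hc h

lemma pvB_eq_sum (arr : List Int) (k R : Int) :
    count_at_most_k_len_le_alt arr k R =
      ∑ i ∈ Finset.range arr.length, ∑ r ∈ Finset.range arr.length, pvW arr k R i r := by
  unfold count_at_most_k_len_le_alt
  rw [pvRange_cast, List.foldl_map]
  rw [pvFoldl_add (fun i => (pvCap k ∅ ((arr.drop i).take (max R 0).toNat) : Int)) _ _
    (fun t i _ => by
      rw [pvSliceB arr R i, pvBInner_eq k _ PySem.Set.empty t (by exact List.nodup_nil)]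
      rfl) 0]
  rw [zero_add]
  have : ((List.range arr.length).map
      (fun i => (pvCap k ∅ ((arr.drop i).take (max R 0).toNat) : Int))).sum =
      ∑ i ∈ Finset.range arr.length, (pvCap k ∅ ((arr.drop i).take (max R 0).toNat) : Int) := rfl
  rw [this]
  refine Finset.sum_congr rfl fun i hi => ?_
  exact pvColumn arr k R i (by simpa using hi)

-- ===== VERDICT (by name: the statement is the Claim_ definition above) =====
theorem count_at_most_k_len_le_spec : Claim_equal_count_at_most_k_len_le := by
  intro arr k R _hdom hpre
  unfold Spec_count_at_most_k_len_le
  rw [pvB_eq_sum, ← Finset.sum_comm]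
  by_cases hR : R ≤ 0
  · have hz : ∀ r ∈ Finset.range arr.length, ∑ i ∈ Finset.range arr.length, pvW arr k R i r = 0 := by
      intro r _
      refine Finset.sum_eq_zero fun i _ => ?_
      unfold pvW
      rw [if_neg]
      rintro ⟨h1, h2, -⟩
      omega
    rw [Finset.sum_eq_zero hz]
    simp [count_at_most_k_len_le, hR]
  · push_neg at hR
    by_cases hk : 0 ≤ k
    · exact pvA_eq_sum arr k R hk hR
    · push_neg at hk
      have harr : arr = [] := by
        rcases hpre with h | h | h
        · omega
        · exact h
        · omega
      subst harr
      simp [count_at_most_k_len_le, pvRange_cast]
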